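-- pv_equiv track=rewrite | github.com/reyannlarkey/Cribbage_Hand_Simulator | main.py | run_points
-- ===== SOURCE A (Python) =====
-- import itertools
--
-- def run_points(hand_to_evaluate):
--     # This one's a little trickier, because we need to update:
--     # J->11
--     # Q->12
--     # K->13
--     # so we can just look at sequential #'s
--     total_score = []
--     hand = [list(x) for x in hand_to_evaluate] # convert hands to lists
--
--     for i, card in enumerate(hand):
--         if card[1] == "J":
--             hand[i][2]=11
--         if card[1] == "Q":
--             hand[i][2]=12
--         if card[1] == "K":
--             hand[i][2] = 13
--
--     numbers = [i[2] for i in hand]  # get just the numbers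
--
--     ### This gets the consecutive #'s
--     gb = itertools.groupby(enumerate(sorted(set(numbers))), key=lambda x: x[0] - x[1])
--
--     # Repack elements from each group into list
--     all_groups = ([i[1] for i in g] for _, g in gb)
--
--     # Filter out one element lists
--     run_cards = list(filter(lambda x: len(x) >=3 , all_groups))
--
--     # For each run, count up the points (c), then add them together (total_score)
--     hand_score= 0
--     for i in run_cards:
--         c = len(i)
--         for num in i:
--             c*=numbers.count(num)
--         hand_score+=c
--
--     total_score.append(hand_score)
--     return total_score
-- ===== SOURCE B (Python) =====
-- from collections import Counter
--
--
-- def run_points(hand_to_evaluate):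
--     # Map J/Q/K to 11/12/13 so runs are consecutive integers.
--     numbers = [13 if r == "K" else 12 if r == "Q" else 11 if r == "J" else v
--                for (_, r, v) in hand_to_evaluate]
--     values = set(numbers)
--     cnt = Counter(numbers)
--     hand_score = 0
--     for v in values:
--         if v - 1 in values:
--             continue  # v is inside a run, not its start
--         length = 1
--         while v + length in values:
--             length += 1
--         if length >= 3:
--             pts = length
--             for j in range(length):
--                 pts *= cnt[v + j]
--             hand_score += pts
--     return [hand_score]
-- ===== Notes on version B (the rewrite author's own statement) =====
-- stated objective: idiomatic
-- what changed: B replaces sort + itertools.groupby(enumerate(...)) + repeated numbers.count scans with set-membership run detection (a value starts a run iff value-1 is absent, extended forward while value+k is present) and a Counter built once for the multiplicities.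
import Mathlib
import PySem

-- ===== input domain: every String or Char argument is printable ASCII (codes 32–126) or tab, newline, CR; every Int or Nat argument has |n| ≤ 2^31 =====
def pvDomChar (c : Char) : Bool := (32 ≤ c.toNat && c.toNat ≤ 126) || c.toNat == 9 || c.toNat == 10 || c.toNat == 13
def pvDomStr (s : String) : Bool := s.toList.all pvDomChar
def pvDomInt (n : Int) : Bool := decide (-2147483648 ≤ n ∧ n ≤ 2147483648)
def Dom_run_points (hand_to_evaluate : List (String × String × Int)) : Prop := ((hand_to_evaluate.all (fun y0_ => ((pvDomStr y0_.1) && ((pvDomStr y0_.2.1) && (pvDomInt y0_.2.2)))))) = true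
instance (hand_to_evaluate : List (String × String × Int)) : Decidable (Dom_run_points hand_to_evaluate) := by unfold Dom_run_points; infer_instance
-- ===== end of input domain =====

-- B replaces sort+groupby+repeated .count scans by set-membership run detection with a Counter (idiomatic; same results).

-- ===== PORT A =====
-- key = lambda x: x[0] - x[1]
def pvKeyA (p : Int × Int) : Int := p.1 - p.2

-- itertools.groupby, one step: attach element a in front of the groups of the rest
def pvGroupByAux (key : Int × Int → Int) (a : Int × Int) :
    List (List (Int × Int)) → List (List (Int × Int))
  | (b :: g) :: gs => if key a = key b then (a :: b :: g) :: gs else [a] :: (b :: g) :: gs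
  | gs => [a] :: gs

-- itertools.groupby: split into maximal blocks of consecutive elements with equal key
def pvGroupBy (key : Int × Int → Int) : List (Int × Int) → List (List (Int × Int))
  | [] => []
  | a :: l => pvGroupByAux key a (pvGroupBy key l)

def run_points (hand_to_evaluate : List (String × String × Int)) : List Int :=
  -- hand = [list(x) for x in hand_to_evaluate]; the J/Q/K loop mutates field 2 in sequence
  let hand := hand_to_evaluate.map (fun card =>
    let v0 := card.2.2
    let v1 := if card.2.1 == "J" then (11 : Int) else v0
    let v2 := if card.2.1 == "Q" then (12 : Int) else v1
    let v3 := if card.2.1 == "K" then (13 : Int) else v2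
    (card.1, card.2.1, v3))
  let numbers := hand.map (fun c => c.2.2)
  let gb := pvGroupBy pvKeyA
      (PySem.List.enumerate (PySem.List.sorted (PySem.Set.ofList numbers) (fun x => x) false) 0)
  let all_groups := gb.map (fun g => g.map (fun p => p.2))
  let run_cards := all_groups.filter (fun g => 3 ≤ g.length)
  let hand_score := run_cards.foldl (fun acc g =>
      acc + g.foldl (fun c num => c * ((PySem.List.count numbers num : Nat) : Int)) (g.length : Int)) 0
  ([] : List Int) ++ [hand_score]

-- ===== PORT B =====
-- the while loop 'length = 1; while v+length in values: length += 1'; fuel = |values| suffices since v ∈ values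
def pvChainGo (s : List Int) (v : Int) : Nat → Int → Int
  | 0, len => len
  | fuel + 1, len => if (v + len) ∈ s then pvChainGo s v fuel (len + 1) else len

def run_points_alt (hand_to_evaluate : List (String × String × Int)) : List Int :=
  let numbers := hand_to_evaluate.map (fun c =>
    if c.2.1 == "K" then (13 : Int) else if c.2.1 == "Q" then 12
    else if c.2.1 == "J" then 11 else c.2.2)
  let values := PySem.Set.ofList numbers
  let cnt := PySem.Dict.counter numbers
  let hand_score := values.foldl (fun acc v =>
    if (v - 1) ∈ values then acc
    else
      let length := pvChainGo values v values.length 1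
      if 3 ≤ length then
        acc + (PySem.List.pyRange 0 length 1).foldl (fun pts j => pts * cnt.getD (v + j) 0) length
      else acc) 0
  [hand_score]

-- ===== PRECONDITION & SPEC =====
def Spec_run_points (hand_to_evaluate : List (String × String × Int)) (out : List Int) : Prop := out = run_points_alt hand_to_evaluate
instance (hand_to_evaluate : List (String × String × Int)) (out : List Int) : Decidable (Spec_run_points hand_to_evaluate out) := by unfold Spec_run_points; infer_instance

-- ===== CLAIM (what is proved, stated in full; the proofs are below) =====
def Claim_equal_run_points : Prop := ∀ (hand_to_evaluate : List (String × String × Int)), Dom_run_points hand_to_evaluate → Spec_run_points hand_to_evaluate (run_points hand_to_evaluate)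

-- ===== LEMMAS AND PROOFS =====

-- the value-level run decomposition produced by groupby on the enumerate pairs
def pvRunsAux (a : Int) : List (List Int) → List (List Int)
  | (b :: g) :: gs => if b = a + 1 then (a :: b :: g) :: gs else [a] :: (b :: g) :: gs
  | gs => [a] :: gs

def pvRuns : List Int → List (List Int)
  | [] => []
  | a :: l => pvRunsAux a (pvRuns l)

-- A's per-group score with the length-≥3 filter folded in
def pvScoreIf (numbers : List Int) (g : List Int) : Int :=
  if 3 ≤ g.length then g.foldl (fun c num => c * ((PySem.List.count numbers num : Nat) : Int)) (g.length : Int) else 0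

-- B's per-value summand (counts looked up directly in numbers)
def pvG (numbers s : List Int) (v : Int) : Int :=
  if (v - 1) ∈ s then 0
  else
    let length := pvChainGo s v s.length 1
    if 3 ≤ length then
      (PySem.List.pyRange 0 length 1).foldl
        (fun pts j => pts * ((PySem.List.count numbers (v + j) : Nat) : Int)) length
    else 0

lemma pvGroupByAux_shape (key : Int × Int → Int) (a : Int × Int) (L : List (List (Int × Int))) :
    ∃ g gs, pvGroupByAux key a L = (a :: g) :: gs := by
  rcases L with _ | ⟨_ | ⟨b, g⟩, gs⟩
  · exact ⟨[], [], rfl⟩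
  · exact ⟨[], [] :: gs, rfl⟩
  · by_cases hk : key a = key b
    · exact ⟨b :: g, gs, by simp [pvGroupByAux, hk]⟩
    · exact ⟨[], (b :: g) :: gs, by simp [pvGroupByAux, hk]⟩

lemma pvRunsAux_shape (a : Int) (L : List (List Int)) :
    ∃ g gs, pvRunsAux a L = (a :: g) :: gs := by
  rcases L with _ | ⟨_ | ⟨b, g⟩, gs⟩
  · exact ⟨[], [], rfl⟩
  · exact ⟨[], [] :: gs, rfl⟩
  · by_cases hk : b = a + 1
    · exact ⟨b :: g, gs, by simp [pvRunsAux, hk]⟩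
    · exact ⟨[], (b :: g) :: gs, by simp [pvRunsAux, hk]⟩

lemma pvRuns_shape (a : Int) (l : List Int) :
    ∃ g gs, pvRuns (a :: l) = (a :: g) :: gs := by
  simp only [pvRuns]
  exact pvRunsAux_shape a (pvRuns l)

lemma pvRuns_ne_nil (l : List Int) : ∀ g ∈ pvRuns l, g ≠ [] := by
  induction l with
  | nil => simp [pvRuns]
  | cons a l ih =>
    intro g hg
    simp only [pvRuns] at hg
    rcases h : pvRuns l with _ | ⟨_ | ⟨b, g'⟩, gs⟩ <;> rw [h] at hg <;> simp only [pvRunsAux] at hg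
    · simp only [List.mem_singleton] at hg
      simp [hg]
    · rcases List.mem_cons.mp hg with rfl | hg2
      · simp
      · exact ih _ (h ▸ hg2)
    · by_cases hk : b = a + 1
      · rw [if_pos hk] at hg
        rcases List.mem_cons.mp hg with rfl | hg2
        · simp
        · exact ih _ (h ▸ List.mem_cons_of_mem _ hg2)
      · rw [if_neg hk] at hg
        rcases List.mem_cons.mp hg with rfl | hg2
        · simp
        · exact ih _ (h ▸ hg2)

lemma pvRuns_flatten (l : List Int) : (pvRuns l).flatten = l := by
  induction l with
  | nil => simp [pvRuns]
  | cons a l ih =>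
    simp only [pvRuns]
    rcases h : pvRuns l with _ | ⟨_ | ⟨b, g⟩, gs⟩ <;> rw [h] at ih <;> simp only [pvRunsAux]
    · simpa using ih
    · simpa using ih
    · by_cases hk : b = a + 1
      · rw [if_pos hk]; simpa using ih
      · rw [if_neg hk]; simpa using ih

-- groupby over enumerate, with indices dropped again, is exactly pvRuns
lemma pvGroupBy_enumerate (l : List Int) (i : Int) :
    (pvGroupBy pvKeyA (PySem.List.enumerate l i)).map (fun g => g.map (fun p => p.2)) = pvRuns l := by
  induction l generalizing i with
  | nil => simp [pvGroupBy, pvRuns, PySem.List.enumerate_nil]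
  | cons a l ih =>
    cases l with
    | nil =>
      simp [pvGroupBy, pvGroupByAux, pvRuns, pvRunsAux, PySem.List.enumerate_cons,
        PySem.List.enumerate_nil]
    | cons c t =>
      have hgc0 : pvGroupBy pvKeyA (PySem.List.enumerate (c :: t) (i + 1))
          = pvGroupByAux pvKeyA (i + 1, c) (pvGroupBy pvKeyA (PySem.List.enumerate t (i + 1 + 1))) := by
        rw [PySem.List.enumerate_cons]; rfl
      obtain ⟨g, gs, hg⟩ := pvGroupByAux_shape pvKeyA (i + 1, c) (pvGroupBy pvKeyA (PySem.List.enumerate t (i + 1 + 1)))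
      obtain ⟨g', gs', hg'⟩ := pvRuns_shape c t
      have ih' := ih (i + 1)
      rw [hgc0, hg, hg'] at ih'
      simp only [List.map_cons, List.cons.injEq] at ih'
      obtain ⟨⟨-, hgg⟩, hgs⟩ := ih'
      rw [PySem.List.enumerate_cons]
      simp only [pvGroupBy, pvRuns]
      have hg'' : pvRunsAux c (pvRuns t) = (c :: g') :: gs' := by
        have hx := hg'; simp only [pvRuns] at hx; exact hx
      rw [hgc0, hg, hg'']
      have hkey : (pvKeyA (i, a) = pvKeyA (i + 1, c)) ↔ (c = a + 1) := by
        simp only [pvKeyA]; omega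
      simp only [pvGroupByAux, pvRunsAux]
      by_cases hc : c = a + 1
      · rw [if_pos (hkey.mpr hc), if_pos hc]
        simp [hgg, hgs]
      · rw [if_neg (fun h => hc (hkey.mp h)), if_neg hc]
        simp [hgg, hgs]

lemma pvRuns_head_range (l : List Int) (b : Int) (g : List Int) (gs : List (List Int))
    (h : pvRuns l = (b :: g) :: gs) :
    b :: g = PySem.List.pyRange b (b + (g.length + 1)) 1 := by
  induction l generalizing b g gs with
  | nil => simp [pvRuns] at h
  | cons a l ih =>
    simp only [pvRuns] at h
    rcases h' : pvRuns l with _ | ⟨_ | ⟨c, g'⟩, gs'⟩ <;> rw [h'] at h <;> simp only [pvRunsAux] at h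
    · simp only [List.cons.injEq] at h
      obtain ⟨⟨rfl, rfl⟩, rfl⟩ := h
      have hb1 : (a + ((([] : List Int).length : Int) + 1)) = a + 1 := by simp
      rw [hb1, PySem.List.pyRange_one_singleton]
    · simp only [List.cons.injEq] at h
      obtain ⟨⟨rfl, rfl⟩, rfl⟩ := h
      have hb1 : (a + ((([] : List Int).length : Int) + 1)) = a + 1 := by simp
      rw [hb1, PySem.List.pyRange_one_singleton]
    · by_cases hk : c = a + 1
      · rw [if_pos hk] at h
        simp only [List.cons.injEq] at h
        obtain ⟨⟨rfl, rfl⟩, rfl⟩ := h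
        have hcg := ih c g' gs' h'
        rw [PySem.List.pyRange_one_cons (by omega)]
        simp only [List.length_cons, List.cons.injEq, true_and]
        rw [hcg]
        congr 1
        all_goals first
          | omega
          | (push_cast; ring)
      · rw [if_neg hk] at h
        simp only [List.cons.injEq] at h
        obtain ⟨⟨rfl, rfl⟩, rfl⟩ := h
        have hb1 : (a + ((([] : List Int).length : Int) + 1)) = a + 1 := by simp
        rw [hb1, PySem.List.pyRange_one_singleton]

lemma pvRuns_boundary (l : List Int) (b : Int) (g : List Int) (gs : List (List Int))
    (hs : l.Pairwise (· < ·)) (h : pvRuns l = (b :: g) :: gs) :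
    (b + (g.length + 1) : Int) ∉ l := by
  induction l generalizing b g gs with
  | nil => simp [pvRuns] at h
  | cons a l ih =>
    have hal : ∀ x ∈ l, a < x := (List.pairwise_cons.mp hs).1
    have hsl : l.Pairwise (· < ·) := (List.pairwise_cons.mp hs).2
    simp only [pvRuns] at h
    rcases h' : pvRuns l with _ | ⟨_ | ⟨c, g'⟩, gs'⟩ <;> rw [h'] at h <;> simp only [pvRunsAux] at h
    · have hl : l = [] := by
        have hf := pvRuns_flatten l; rw [h'] at hf; simpa using hf.symm
      simp only [List.cons.injEq] at h
      obtain ⟨⟨rfl, rfl⟩, rfl⟩ := h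
      intro hmm
      rw [hl] at hmm
      simp only [List.mem_singleton] at hmm
      omega
    · exact absurd rfl (pvRuns_ne_nil l [] (by rw [h']; exact List.mem_cons_self))
    · have hlx : l = (c :: g') ++ gs'.flatten := by
        have hf := pvRuns_flatten l; rw [h'] at hf; simpa using hf.symm
      have hchead : c ∈ l := by rw [hlx]; simp
      have hca : a < c := hal c hchead
      by_cases hk : c = a + 1
      · rw [if_pos hk] at h
        simp only [List.cons.injEq] at h
        obtain ⟨⟨rfl, rfl⟩, rfl⟩ := h
        have hb := ih c g' gs' hsl h'
        intro hmm
        rcases List.mem_cons.mp hmm with heq | hmem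
        · simp only [List.length_cons] at heq; push_cast at heq; omega
        · apply hb
          have he : (a + (((c :: g').length : Int) + 1)) = c + ((g'.length : Int) + 1) := by
            simp only [List.length_cons]; push_cast; omega
          rw [he] at hmem
          exact hmem
      · rw [if_neg hk] at h
        simp only [List.cons.injEq] at h
        obtain ⟨⟨rfl, rfl⟩, rfl⟩ := h
        have hcl : ∀ x ∈ l, c ≤ x := by
          intro x hx
          rw [hlx] at hx
          rcases List.mem_append.mp hx with hx | hx
          · rcases List.mem_cons.mp hx with rfl | hx
            · exact le_refl _
            · have hr := pvRuns_head_range l c g' gs' h'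
              have hx2 : x ∈ PySem.List.pyRange c (c + (g'.length + 1)) 1 := by
                rw [← hr]; exact List.mem_cons_of_mem _ hx
              exact ((PySem.List.mem_pyRange_one).mp hx2).1
          · rw [hlx] at hsl
            rcases (List.pairwise_append.mp hsl) with ⟨h1, h2, h3⟩
            exact le_of_lt (h3 c (by simp) x hx)
        intro hmm
        rcases List.mem_cons.mp hmm with heq | hmem
        · simp only [List.length_nil] at heq; omega
        · have := hcl _ hmem
          simp only [List.length_nil] at this ⊢
          omega

-- pvChainGo computes the unique L with v+1..v+L-1 present and v+L absent
lemma pvChainGo_eq (s : List Int) (v L : Int) :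
    ∀ (fuel : Nat) (len : Int), len ≤ L →
      (∀ j : Int, len ≤ j → j < L → v + j ∈ s) → (v + L) ∉ s →
      (L - len).toNat ≤ fuel → pvChainGo s v fuel len = L := by
  intro fuel
  induction fuel with
  | zero =>
    intro len h1 _ _ h4
    have : len = L := by omega
    simp [pvChainGo, this]
  | succ fuel ih =>
    intro len h1 h2 h3 h4
    by_cases hLen : len = L
    · subst hLen
      simp [pvChainGo, h3]
    · have hlt : len < L := lt_of_le_of_ne h1 hLen
      have hmem : v + len ∈ s := h2 len le_rfl hlt
      simp only [pvChainGo, if_pos hmem]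
      exact ih (len + 1) (by omega) (fun j hj1 hj2 => h2 j (by omega) hj2) h3 (by omega)

-- existence of the maximal chain length for v ∈ s (s duplicate-free)
lemma pvChain_exists (s : List Int) (v : Int) (hnd : s.Nodup) (hv : v ∈ s) :
    ∃ L : Int, 1 ≤ L ∧ L ≤ s.length ∧ (∀ j : Int, 1 ≤ j → j < L → v + j ∈ s) ∧ (v + L) ∉ s := by
  have hinj : Function.Injective (fun j : Nat => v + (j : Int)) := by
    intro x y hxy; simpa using hxy
  have hex : ∃ j : Nat, 1 ≤ j ∧ (v + (j : Int)) ∉ s := by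
    by_contra hcon
    push_neg at hcon
    have hsub : ((List.range (s.length + 1)).map (fun j : Nat => v + (j : Int))) ⊆ s := by
      intro x hx
      simp only [List.mem_map, List.mem_range] at hx
      obtain ⟨j, hj, rfl⟩ := hx
      rcases Nat.eq_zero_or_pos j with rfl | hj1
      · simpa using hv
      · exact hcon j hj1
    have hnd2 : ((List.range (s.length + 1)).map (fun j : Nat => v + (j : Int))).Nodup :=
      List.nodup_range.map hinj
    have hle := (hnd2.subperm hsub).length_le
    simp at hle
  classical
  have hL0 := Nat.find_spec hex
  have hmem0 : ∀ j : Nat, j < Nat.find hex → v + (j : Int) ∈ s := by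
    intro j hj
    rcases Nat.eq_zero_or_pos j with rfl | hj1
    · simpa using hv
    · have hmin := Nat.find_min hex hj
      by_contra hc
      exact hmin ⟨hj1, hc⟩
  have hbound : Nat.find hex ≤ s.length := by
    have hsub : ((List.range (Nat.find hex)).map (fun j : Nat => v + (j : Int))) ⊆ s := by
      intro x hx
      simp only [List.mem_map, List.mem_range] at hx
      obtain ⟨j, hj, rfl⟩ := hx
      exact hmem0 j hj
    have hnd2 : ((List.range (Nat.find hex)).map (fun j : Nat => v + (j : Int))).Nodup :=
      List.nodup_range.map hinj
    have hle := (hnd2.subperm hsub).length_le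
    simpa using hle
  refine ⟨(Nat.find hex : Int), by exact_mod_cast hL0.1, by exact_mod_cast hbound, ?_, hL0.2⟩
  intro j hj1 hj2
  have hj : j = ((j.toNat : Nat) : Int) := by omega
  rw [hj]
  exact hmem0 j.toNat (by omega)

-- pvG at a run start b of length L equals A's group score of the range block
lemma pvG_run (numbers s : List Int) (b : Int) (L : Nat)
    (h1 : 1 ≤ L)
    (hmem : ∀ j : Nat, j < L → (b + (j : Int)) ∈ s)
    (hout : (b + (L : Int)) ∉ s)
    (hpre : (b - 1) ∉ s)
    (hfuel : L - 1 ≤ s.length) :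
    pvG numbers s b = pvScoreIf numbers (PySem.List.pyRange b (b + L) 1) := by
  have hchain : pvChainGo s b s.length 1 = (L : Int) := by
    apply pvChainGo_eq s b (L : Int) s.length 1 (by exact_mod_cast h1) ?_ hout (by omega)
    intro j hj1 hj2
    have he : (b + j) = b + ((j.toNat : Nat) : Int) := by omega
    rw [he]
    exact hmem j.toNat (by omega)
  have hlen : (PySem.List.pyRange b (b + L) 1).length = L := by
    rw [PySem.List.length_pyRange_one]; omega
  simp only [pvG, pvScoreIf, if_neg hpre, hchain, hlen]
  by_cases h3 : 3 ≤ L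
  · rw [if_pos (by exact_mod_cast h3), if_pos h3]
    rw [PySem.List.pyRange_one b (b + L), PySem.List.pyRange_one 0 (L : Int), List.foldl_map, List.foldl_map]
    have he1 : ((b : Int) + (L : Int) - b).toNat = L := by omega
    have he2 : ((L : Int) - 0).toNat = L := by omega
    rw [he1, he2]
    have hfun : (fun (c : Int) (k : Nat) => c * ((PySem.List.count numbers (b + (k : Int)) : Nat) : Int))
        = (fun (pts : Int) (k : Nat) => pts * ((PySem.List.count numbers (b + (0 + (k : Int))) : Nat) : Int)) := by
      funext c k
      norm_num
    rw [hfun]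
  · rw [if_neg (by exact_mod_cast h3), if_neg h3]

-- for v deeper in a sorted list, dropping the (smaller) head changes nothing
lemma pvG_cons (numbers : List Int) (a : Int) (l : List Int) (v : Int)
    (hs : (a :: l).Pairwise (· < ·)) (hv : v ∈ l) (hne : v ≠ a + 1) :
    pvG numbers (a :: l) v = pvG numbers l v := by
  have hal : ∀ x ∈ l, a < x := (List.pairwise_cons.mp hs).1
  have hsl : l.Pairwise (· < ·) := (List.pairwise_cons.mp hs).2
  have hav : a < v := hal v hv
  have hm1 : ((v - 1) ∈ (a :: l)) ↔ ((v - 1) ∈ l) := by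
    simp only [List.mem_cons, or_iff_right_iff_imp]
    intro h; exact absurd h.symm (by omega)
  by_cases hpre : (v - 1) ∈ l
  · simp only [pvG, if_pos hpre, if_pos (hm1.mpr hpre)]
  · obtain ⟨L, hL1, hL2, hL3, hL4⟩ := pvChain_exists l v hsl.nodup hv
    have hc1 : pvChainGo l v l.length 1 = L :=
      pvChainGo_eq l v L l.length 1 hL1 (fun j hj1 hj2 => hL3 j hj1 hj2) hL4 (by omega)
    have hc2 : pvChainGo (a :: l) v (a :: l).length 1 = L := by
      apply pvChainGo_eq (a :: l) v L (a :: l).length 1 hL1 ?_ ?_ (by simp; omega)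
      · intro j hj1 hj2
        exact List.mem_cons_of_mem _ (hL3 j hj1 hj2)
      · simp only [List.mem_cons, not_or]
        exact ⟨by omega, hL4⟩
    simp only [pvG, if_neg hpre, if_neg (fun h => hpre (hm1.mp h)), hc1, hc2]

-- pvG depends only on membership (for lists of equal length)
lemma pvG_congr (numbers s t : List Int) (v : Int)
    (hnd : t.Nodup) (hlen : s.length = t.length)
    (hmem : ∀ x : Int, x ∈ s ↔ x ∈ t) (hv : v ∈ t) :
    pvG numbers s v = pvG numbers t v := by
  obtain ⟨L, hL1, hL2, hL3, hL4⟩ := pvChain_exists t v hnd hv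
  have hc1 : pvChainGo t v t.length 1 = L :=
    pvChainGo_eq t v L t.length 1 hL1 hL3 hL4 (by omega)
  have hc2 : pvChainGo s v s.length 1 = L := by
    apply pvChainGo_eq s v L s.length 1 hL1 ?_ ?_ (by omega)
    · intro j hj1 hj2; exact (hmem _).mpr (hL3 j hj1 hj2)
    · intro h; exact hL4 ((hmem _).mp h)
  have hm : ((v - 1) ∈ s) ↔ ((v - 1) ∈ t) := hmem (v - 1)
  by_cases hp : (v - 1) ∈ t
  · simp only [pvG, if_pos hp, if_pos (hm.mpr hp)]
  · simp only [pvG, if_neg hp, if_neg (fun h => hp (hm.mp h)), hc1, hc2]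

-- sum of filtered-and-scored groups as a sum of if-scores
lemma sum_map_filter_eq (l : List (List Int)) (f : List Int → Int) (p : List Int → Bool) :
    ((l.filter p).map f).sum = (l.map (fun g => if p g then f g else 0)).sum := by
  induction l with
  | nil => simp
  | cons a l ih =>
    by_cases h : p a <;> simp [h, ih]

-- the heart: A's per-run sum over pvRuns equals B's per-value sum
lemma sum_runs (numbers : List Int) : ∀ d : List Int, d.Pairwise (· < ·) →
    ((pvRuns d).map (pvScoreIf numbers)).sum = (d.map (pvG numbers d)).sum := by
  intro d
  induction d with
  | nil => simp [pvRuns]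
  | cons a l ih =>
    intro hs
    have hal : ∀ x ∈ l, a < x := (List.pairwise_cons.mp hs).1
    have hsl : l.Pairwise (· < ·) := (List.pairwise_cons.mp hs).2
    cases l with
    | nil =>
      have hch : pvChainGo [a] a 1 1 = 1 := by
        simp [pvChainGo]
      simp [pvRuns, pvRunsAux, pvScoreIf, pvG, hch]
    | cons c t =>
      obtain ⟨g', gs', h'⟩ := pvRuns_shape c t
      have hflat : c :: t = (c :: g') ++ gs'.flatten := by
        have hf := pvRuns_flatten (c :: t); rw [h'] at hf; simpa using hf.symm
      have hrange : c :: g' = PySem.List.pyRange c (c + (g'.length + 1)) 1 :=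
        pvRuns_head_range (c :: t) c g' gs' h'
      have hbound : (c + ((g'.length : Int) + 1) : Int) ∉ c :: t :=
        pvRuns_boundary (c :: t) c g' gs' hsl h'
      have hac : a < c := hal c (by simp)
      have hndl : (c :: t).Nodup := hsl.nodup
      have hgmem : ∀ j : Nat, j < g'.length + 1 → (c + (j : Int)) ∈ (c :: t) := by
        intro j hj
        have hx : (c + (j : Int)) ∈ PySem.List.pyRange c (c + ((g'.length : Int) + 1)) 1 := by
          rw [PySem.List.mem_pyRange_one]
          constructor
          · omega
          · push_cast; omega
        rw [← hrange] at hx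
        rw [hflat]
        exact List.mem_append_left _ hx
      have hclow : ∀ x ∈ (c :: t), c ≤ x := by
        intro x hx
        rcases List.mem_cons.mp hx with rfl | hx
        · exact le_rfl
        · exact le_of_lt ((List.pairwise_cons.mp hsl).1 x hx)
      have hlen' : t.length = g'.length + gs'.flatten.length := by
        have hx := congrArg List.length hflat
        simpa using hx
      have hGc : pvG numbers (c :: t) c = pvScoreIf numbers (PySem.List.pyRange c (c + ((g'.length + 1 : Nat) : Int)) 1) := by
        apply pvG_run numbers (c :: t) c (g'.length + 1) (by omega) ?_ ?_ ?_ (by simp only [List.length_cons]; omega)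
        · intro j hj; exact hgmem j hj
        · intro hmm
          apply hbound
          have he : (c + ((g'.length + 1 : Nat) : Int)) = c + ((g'.length : Int) + 1) := by push_cast; ring
          rw [he] at hmm
          exact hmm
        · intro hmm
          have := hclow _ hmm; omega
      have hrangeN : PySem.List.pyRange c (c + ((g'.length + 1 : Nat) : Int)) 1 = c :: g' := by
        rw [show (c + ((g'.length + 1 : Nat) : Int)) = c + ((g'.length : Int) + 1) by push_cast; ring]
        exact hrange.symm
      rw [hrangeN] at hGc
      have ihl := ih hsl
      rw [h'] at ihl
      simp only [List.map_cons, List.sum_cons] at ihl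
      by_cases hk : c = a + 1
      · subst hk
        have hd : pvRuns (a :: (a + 1) :: t) = (a :: (a + 1) :: g') :: gs' := by
          simp only [pvRuns] at h' ⊢
          rw [h']
          simp [pvRunsAux]
        have hGa : pvG numbers (a :: (a + 1) :: t) a = pvScoreIf numbers (PySem.List.pyRange a (a + ((g'.length + 2 : Nat) : Int)) 1) := by
          apply pvG_run numbers (a :: (a + 1) :: t) a (g'.length + 2) (by omega) ?_ ?_ ?_ (by simp only [List.length_cons]; omega)
          · intro j hj
            rcases Nat.eq_zero_or_pos j with rfl | hj1
            · simp
            · have he : (a + (j : Int)) = (a + 1) + ((j - 1 : Nat) : Int) := by push_cast; omega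
              rw [he]
              exact List.mem_cons_of_mem _ (hgmem (j - 1) (by omega))
          · intro hmm
            rcases List.mem_cons.mp hmm with h1 | hmm2
            · omega
            · apply hbound
              rw [show ((a + 1) + ((g'.length : Int) + 1)) = a + ((g'.length + 2 : Nat) : Int) by push_cast; ring]
              exact hmm2
          · intro hmm
            rcases List.mem_cons.mp hmm with heq | hmm
            · omega
            · have := hclow _ hmm; omega
        have hrange2 : PySem.List.pyRange a (a + ((g'.length + 2 : Nat) : Int)) 1 = a :: (a + 1) :: g' := by
          rw [PySem.List.pyRange_one_cons (by push_cast; omega)]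
          congr 1
          rw [show (a + ((g'.length + 2 : Nat) : Int)) = (a + 1) + ((g'.length : Int) + 1) by push_cast; ring]
          exact hrange.symm
        rw [hrange2] at hGa
        have hGc0 : pvG numbers (a :: (a + 1) :: t) (a + 1) = 0 := by
          have hmm : ((a + 1) - 1) ∈ (a :: (a + 1) :: t) := by
            simp only [List.mem_cons]
            left; omega
          simp only [pvG, if_pos hmm]
        have hrestG : ∀ v ∈ t, pvG numbers (a :: (a + 1) :: t) v = pvG numbers ((a + 1) :: t) v := by
          intro v hv
          apply pvG_cons numbers a ((a + 1) :: t) v hs (List.mem_cons_of_mem _ hv)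
          intro hva
          rw [hva] at hv
          exact (List.nodup_cons.mp hndl).1 hv
        rw [hd]
        simp only [List.map_cons, List.sum_cons]
        rw [hGa, hGc0, List.map_congr_left hrestG]
        omega
      · have hd : pvRuns (a :: c :: t) = [a] :: (c :: g') :: gs' := by
          simp only [pvRuns] at h' ⊢
          rw [h']
          simp [pvRunsAux, hk]
        have hGa0 : pvG numbers (a :: c :: t) a = 0 := by
          have hch : pvChainGo (a :: c :: t) a (a :: c :: t).length 1 = 1 := by
            apply pvChainGo_eq _ _ 1 _ 1 le_rfl (by intro j h1 h2; omega) ?_ (by simp)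
            intro hmm
            rcases List.mem_cons.mp hmm with heq | hmm
            · omega
            · have := hclow _ hmm
              omega
          simp only [pvG, hch]
          rw [if_neg ?_]
          · norm_num
          · intro hmm
            rcases List.mem_cons.mp hmm with heq | hmm
            · omega
            · have := hclow _ hmm; omega
        have hrestG : ∀ v ∈ (c :: t), pvG numbers (a :: c :: t) v = pvG numbers (c :: t) v := by
          intro v hv
          apply pvG_cons numbers a (c :: t) v hs hv
          intro hva
          have h1 := hclow v hv
          rcases List.mem_cons.mp hv with rfl | hv2
          · exact hk hva
          · have := (List.pairwise_cons.mp hsl).1 v hv2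
            omega
        have hGc' : pvG numbers (a :: c :: t) c = pvG numbers (c :: t) c := hrestG c (by simp)
        have hmt : List.map (pvG numbers (a :: c :: t)) t = List.map (pvG numbers (c :: t)) t :=
          List.map_congr_left (fun v hv => hrestG v (List.mem_cons_of_mem _ hv))
        have h0 : pvScoreIf numbers [a] = 0 := by simp [pvScoreIf]
        rw [hd]
        simp only [List.map_cons, List.sum_cons]
        rw [hGa0, hGc', hmt, h0]
        omega

-- assembling both ports' scores from the lemmas above
lemma score_eq (numbers : List Int) :
    ((((pvGroupBy pvKeyA (PySem.List.enumerate (PySem.List.sorted (PySem.Set.ofList numbers) (fun x => x) false) 0)).map (fun g => g.map (fun p => p.2))).filter (fun g => 3 ≤ g.length)).foldl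
        (fun acc g => acc + g.foldl (fun c num => c * ((PySem.List.count numbers num : Nat) : Int)) (g.length : Int)) 0)
      = (PySem.Set.ofList numbers).foldl
          (fun acc v => if (v - 1) ∈ PySem.Set.ofList numbers then acc else
            let length := pvChainGo (PySem.Set.ofList numbers) v (PySem.Set.ofList numbers).length 1
            if 3 ≤ length then acc + (PySem.List.pyRange 0 length 1).foldl (fun pts j => pts * (PySem.Dict.counter numbers).getD (v + j) 0) length else acc) 0 := by
  have hA1 := pvGroupBy_enumerate (PySem.List.sorted (PySem.Set.ofList numbers) (fun x => x) false) 0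
  rw [hA1]
  rw [PySem.List.foldl_add (g := fun g : List Int => g.foldl (fun c num => c * ((PySem.List.count numbers num : Nat) : Int)) (g.length : Int))]
  rw [sum_map_filter_eq]
  have hsc : (fun g : List Int => if (3 ≤ g.length : Bool) then g.foldl (fun c num => c * ((PySem.List.count numbers num : Nat) : Int)) (g.length : Int) else 0) = pvScoreIf numbers := by
    funext g
    simp [pvScoreIf]
  rw [hsc]
  have hbody : (fun (acc : Int) v => if (v - 1) ∈ PySem.Set.ofList numbers then acc else
      let length := pvChainGo (PySem.Set.ofList numbers) v (PySem.Set.ofList numbers).length 1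
      if 3 ≤ length then acc + (PySem.List.pyRange 0 length 1).foldl (fun pts j => pts * (PySem.Dict.counter numbers).getD (v + j) 0) length else acc)
      = (fun acc v => acc + pvG numbers (PySem.Set.ofList numbers) v) := by
    funext acc v
    simp only [pvG, PySem.Dict.getD_counter, PySem.List.count_eq]
    split_ifs <;> simp
  rw [hbody]
  rw [PySem.List.foldl_add (g := pvG numbers (PySem.Set.ofList numbers))]
  rw [sum_runs numbers _ (PySem.List.sorted_ofList_pairwise_lt numbers)]
  have hperm : (PySem.List.sorted (PySem.Set.ofList numbers) (fun x => x) false).Perm (PySem.Set.ofList numbers) :=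
    PySem.List.sorted_perm _ _ _
  have hpt : ∀ v ∈ PySem.List.sorted (PySem.Set.ofList numbers) (fun x => x) false,
      pvG numbers (PySem.List.sorted (PySem.Set.ofList numbers) (fun x => x) false) v
        = pvG numbers (PySem.Set.ofList numbers) v := by
    intro v hv
    apply pvG_congr numbers _ _ v (PySem.Set.nodup_ofList numbers) hperm.length_eq
      (fun x => ⟨fun hx => hperm.mem_iff.mp hx, fun hx => hperm.mem_iff.mpr hx⟩)
      (hperm.mem_iff.mp hv)
  rw [List.map_congr_left hpt]
  rw [(hperm.map (pvG numbers (PySem.Set.ofList numbers))).sum_eq]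

-- ===== VERDICT (by name: the statement is the Claim_ definition above) =====
theorem run_points_spec : Claim_equal_run_points := by
  intro hand _
  show run_points hand = run_points_alt hand
  simp only [run_points, run_points_alt, List.map_map, List.nil_append]
  exact congrArg (fun x => [x]) (score_eq _)
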